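-- pv_equiv track=rewrite | github.com/ifradev-me/handwriting-synthesis | server.py | add_justified_spacing
-- ===== SOURCE A (Python) =====
-- def add_justified_spacing(text, target_length):
--     """Tambahkan spasi ekstra untuk justified alignment"""
--     words = text.split()
--     if len(words) <= 1:
--         return text
--
--     # Hitung jumlah spasi yang dibutuhkan
--     current_length = len(text)
--     spaces_needed = target_length - current_length
--     gaps = len(words) - 1
--
--     if gaps <= 0 or spaces_needed <= 0:
--         return text
--
--     # Distribusikan spasi ekstra
--     base_spaces = spaces_needed // gaps
--     extra_spaces = spaces_needed % gaps
--
--     result = []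
--     for i, word in enumerate(words):
--         result.append(word)
--         if i < len(words) - 1:
--             # Tambahkan 1 spasi normal + spasi tambahan
--             spaces = 1 + base_spaces + (1 if i < extra_spaces else 0)
--             result.append(' ' * spaces)
--
--     return ''.join(result)
-- ===== SOURCE B (Python) =====
-- def add_justified_spacing(text, target_length):
--     """Justified alignment: build the line back-to-front, giving each gap
--     (scanned right to left) the floor of the remaining spaces over the
--     remaining gaps, so the leftover extras accumulate on the earliest gaps."""
--     words = text.split()
--     if len(words) <= 1:
--         return text
--     rem = target_length - len(text)
--     if rem <= 0:
--         return text
--     out = words[-1]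
--     gaps = len(words) - 1
--     for word in reversed(words[:-1]):
--         gap = rem // gaps
--         out = word + ' ' * (1 + gap) + out
--         rem -= gap
--         gaps -= 1
--     return out
-- ===== Notes on version B (the rewrite author's own statement) =====
-- stated objective: alternative
-- what changed: B builds the justified line back-to-front in one right-to-left pass, giving each gap the floor of the remaining spaces over the remaining gaps and carrying the shrinking remainder, instead of A's precomputed divmod plus an index-versus-extra comparison on a forward enumerate loop.
import Mathlib
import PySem

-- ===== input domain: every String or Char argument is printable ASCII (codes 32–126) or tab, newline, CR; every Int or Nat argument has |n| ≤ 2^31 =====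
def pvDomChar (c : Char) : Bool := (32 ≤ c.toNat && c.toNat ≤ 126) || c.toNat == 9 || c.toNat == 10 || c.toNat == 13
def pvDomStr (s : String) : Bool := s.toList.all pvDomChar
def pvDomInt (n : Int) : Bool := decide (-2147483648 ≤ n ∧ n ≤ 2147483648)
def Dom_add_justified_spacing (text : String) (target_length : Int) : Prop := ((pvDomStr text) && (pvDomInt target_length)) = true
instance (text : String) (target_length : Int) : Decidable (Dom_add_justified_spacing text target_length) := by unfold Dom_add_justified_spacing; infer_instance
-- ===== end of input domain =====

-- B rebuilds the line right-to-left with a running remainder and per-gap floor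
-- division, instead of A's precomputed divmod plus an index-vs-extra test (objective: alternative).

-- ===== PORT A =====
def add_justified_spacing (text : String) (target_length : Int) : String :=
  let words := PySem.Str.split₀ text
  if words.length ≤ 1 then text
  else
    let current_length : Int := PySem.Str.len text
    let spaces_needed : Int := target_length - current_length
    let gaps : Int := (words.length : Int) - 1
    if gaps ≤ 0 ∨ spaces_needed ≤ 0 then text
    else
      let base := PySem.Int.floordiv spaces_needed gaps
      let extra := PySem.Int.mod spaces_needed gaps
      let result : List (List Char) :=
        (PySem.List.enumerate words).foldl (fun acc iw =>
          let acc' := acc ++ [iw.2.toList]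
          if iw.1 < (words.length : Int) - 1 then
            acc' ++ [PySem.List.pyRepeat [' '] (1 + base + (if iw.1 < extra then 1 else 0))]
          else acc') []
      String.ofList (PySem.Chars.join [] result)

-- ===== PORT B =====
def add_justified_spacing_alt (text : String) (target_length : Int) : String :=
  let words := PySem.Str.split₀ text
  if words.length ≤ 1 then text
  else
    let rem : Int := target_length - PySem.Str.len text
    if rem ≤ 0 then text
    else
      -- out = words[-1]; for word in reversed(words[:-1]): … , carrying (out, rem, gaps)
      let st :=
        ((PySem.List.slice words none (some (-1))).reverse).foldl
          (fun (st : List Char × Int × Int) word =>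
            let gap := PySem.Int.floordiv st.2.1 st.2.2
            (word.toList ++ PySem.List.pyRepeat [' '] (1 + gap) ++ st.1, st.2.1 - gap, st.2.2 - 1))
          (((PySem.List.pyGet? words (-1)).getD "").toList, rem, (words.length : Int) - 1)
      String.ofList st.1

-- ===== PRECONDITION & SPEC =====
def Spec_add_justified_spacing (text : String) (target_length : Int) (out : String) : Prop := out = add_justified_spacing_alt text target_length
instance (text : String) (target_length : Int) (out : String) : Decidable (Spec_add_justified_spacing text target_length out) := by unfold Spec_add_justified_spacing; infer_instance

-- ===== CLAIM (what is proved, stated in full; the proofs are below) =====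
def Claim_equal_add_justified_spacing : Prop := ∀ (text : String) (target_length : Int), Dom_add_justified_spacing text target_length → Spec_add_justified_spacing text target_length (add_justified_spacing text target_length)

-- ===== LEMMAS AND PROOFS =====

theorem pv_ceil_eq (rem g : Int) (hg : 0 < g) :
    -(PySem.Int.floordiv (-rem) g) =
      PySem.Int.floordiv rem g + (if 0 < PySem.Int.mod rem g then 1 else 0) := by
  have h := PySem.Int.floordiv_mul_add_mod rem g
  have h1 : 0 ≤ PySem.Int.mod rem g := PySem.Int.mod_nonneg rem hg
  have h2 : PySem.Int.mod rem g < g := PySem.Int.mod_lt rem hg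
  rw [PySem.Int.neg_floordiv_neg_eq_iff_of_pos hg]
  split_ifs with hc <;> constructor <;> nlinarith
theorem pv_floor_step (rem g : Int) (hg : 2 ≤ g) :
    PySem.Int.floordiv (rem - -(PySem.Int.floordiv (-rem) g)) (g - 1) =
      PySem.Int.floordiv rem g := by
  have hg0 : (0:Int) < g := by omega
  rw [pv_ceil_eq rem g hg0]
  have h := PySem.Int.floordiv_mul_add_mod rem g
  have h1 : 0 ≤ PySem.Int.mod rem g := PySem.Int.mod_nonneg rem hg0
  have h2 : PySem.Int.mod rem g < g := PySem.Int.mod_lt rem hg0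
  rw [PySem.Int.floordiv_eq_iff_of_pos (by omega : (0:Int) < g - 1)]
  split_ifs with hc <;> constructor <;> nlinarith
theorem pv_mod_step (rem g : Int) (hg : 2 ≤ g) :
    PySem.Int.mod (rem - -(PySem.Int.floordiv (-rem) g)) (g - 1) =
      PySem.Int.mod rem g - (if 0 < PySem.Int.mod rem g then 1 else 0) := by
  have hg0 : (0:Int) < g := by omega
  have h := PySem.Int.floordiv_mul_add_mod rem g
  have h' := PySem.Int.floordiv_mul_add_mod (rem - -(PySem.Int.floordiv (-rem) g)) (g - 1)
  rw [pv_floor_step rem g hg] at h'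
  rw [pv_ceil_eq rem g hg0] at h' ⊢
  split_ifs at h' ⊢ <;> nlinarith
theorem pv_enum_shift {α : Type} (xs : List α) (s : Int) :
    PySem.List.enumerate xs (s + 1) = (PySem.List.enumerate xs s).map (fun q => (q.1 + 1, q.2)) := by
  induction xs generalizing s with
  | nil => simp [PySem.List.enumerate_nil]
  | cons x t ih => simp [PySem.List.enumerate_cons, ih (s+1)]

def build2 : List String → Int → List Char
  | [], _ => []
  | w :: p', rem =>
      let g : Int := (p'.length : Int) + 1
      let c : Int := -(PySem.Int.floordiv (-rem) g)
      w.toList ++ List.replicate (1 + c).toNat ' ' ++ build2 p' (rem - c)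

theorem pv_build2_widths (p : List String) : ∀ rem : Int,
    build2 p rem =
      (PySem.List.enumerate p 0).flatMap (fun iw =>
        iw.2.toList ++ List.replicate
          (1 + PySem.Int.floordiv rem (p.length : Int) +
            (if iw.1 < PySem.Int.mod rem (p.length : Int) then 1 else 0)).toNat ' ') := by
  induction p with
  | nil => intro rem; simp [build2, PySem.List.enumerate_nil]
  | cons w p' ih =>
    intro rem
    rw [build2, PySem.List.enumerate_cons, List.flatMap_cons]
    set g : Int := (p'.length : Int) + 1 with hgdef
    have hlen : ((w :: p').length : Int) = g := by simp [hgdef]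
    set c : Int := -(PySem.Int.floordiv (-rem) g) with hcdef
    have hg0 : (0:Int) < g := by rw [hgdef]; omega
    rw [hlen]
    congr 1
    · show w.toList ++ List.replicate (1 + c).toNat ' ' =
        w.toList ++ List.replicate
          (1 + PySem.Int.floordiv rem g + if (0:Int) < PySem.Int.mod rem g then 1 else 0).toNat ' '
      have hc1 : 1 + c = 1 + PySem.Int.floordiv rem g +
          (if (0:Int) < PySem.Int.mod rem g then 1 else 0) := by
        rw [hcdef, pv_ceil_eq rem g hg0]; split_ifs <;> ring
      rw [hc1]
    · cases p' with
      | nil => simp [build2, PySem.List.enumerate_nil]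
      | cons w2 p'' =>
        have hg2 : 2 ≤ g := by rw [hgdef, List.length_cons]; push_cast; omega
        have h1 : 0 ≤ PySem.Int.mod rem g := PySem.Int.mod_nonneg rem hg0
        have hlen2 : (((w2 :: p'').length : Nat) : Int) = g - 1 := by
          rw [hgdef]; omega
        rw [ih (rem - c), hlen2]
        rw [pv_enum_shift (w2 :: p'') 0, List.flatMap_map]
        apply List.flatMap_congr
        intro q hq
        obtain ⟨k, hk, rfl⟩ := (PySem.List.mem_enumerate_iff _ _ _).mp hq
        simp only
        congr 2
        rw [hcdef, pv_floor_step rem g hg2, pv_mod_step rem g hg2]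
        split_ifs <;> omega

theorem pv_ceil_pred (rem g : Int) (hg : 2 ≤ g) :
    -(PySem.Int.floordiv (-(rem - PySem.Int.floordiv rem g)) (g - 1)) =
      -(PySem.Int.floordiv (-rem) g) := by
  have hg0 : (0:Int) < g := by omega
  have h := PySem.Int.floordiv_mul_add_mod rem g
  have h1 : 0 ≤ PySem.Int.mod rem g := PySem.Int.mod_nonneg rem hg0
  have h2 : PySem.Int.mod rem g < g := PySem.Int.mod_lt rem hg0
  rw [pv_ceil_eq rem g hg0]
  rw [PySem.Int.neg_floordiv_neg_eq_iff_of_pos (by omega : (0:Int) < g - 1)]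
  split_ifs with hc <;> constructor <;> nlinarith

theorem pv_build2_snoc (p : List String) : ∀ (x : String) (rem : Int),
    build2 (p ++ [x]) rem =
      build2 p (rem - PySem.Int.floordiv rem ((p.length : Int) + 1)) ++ x.toList ++
        List.replicate (1 + PySem.Int.floordiv rem ((p.length : Int) + 1)).toNat ' ' := by
  induction p with
  | nil =>
    intro x rem
    show build2 [x] rem = _
    rw [build2, build2, build2]
    simp
  | cons w p'' ih =>
    intro x rem
    have hg2 : 2 ≤ ((w :: p'').length : Int) + 1 := by rw [List.length_cons]; push_cast; omega
    set g : Int := ((w :: p'').length : Int) + 1 with hgdef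
    rw [show (w :: p'') ++ [x] = w :: (p'' ++ [x]) from rfl]
    rw [build2, build2]
    have hlen : ((p'' ++ [x]).length : Int) + 1 = g := by rw [hgdef]; simp
    have hlen' : ((p''.length : Int) + 1) = g - 1 := by rw [hgdef]; simp
    rw [hlen]
    set c : Int := -(PySem.Int.floordiv (-rem) g) with hcdef
    rw [ih x (rem - c), hlen']
    have hb : PySem.Int.floordiv (rem - c) (g - 1) = PySem.Int.floordiv rem g := by
      rw [hcdef]; exact pv_floor_step rem g hg2
    have hcc : -(PySem.Int.floordiv (-(rem - PySem.Int.floordiv rem g)) (g - 1)) = c := by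
      rw [hcdef]; exact pv_ceil_pred rem g hg2
    rw [hb, hcc]
    have harg : rem - PySem.Int.floordiv rem g - c = rem - c - PySem.Int.floordiv rem g := by ring
    rw [harg]
    simp [List.append_assoc]

theorem pv_foldr_char (p : List String) : ∀ (out : List Char) (rem g : Int), g = (p.length : Int) →
    (List.foldr (fun word (st : List Char × Int × Int) =>
        let gap := PySem.Int.floordiv st.2.1 st.2.2
        (word.toList ++ PySem.List.pyRepeat [' '] (1 + gap) ++ st.1, st.2.1 - gap, st.2.2 - 1))
      (out, rem, g) p).1 = build2 p rem ++ out := by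
  induction p using List.reverseRecOn with
  | nil => intro out rem g hg; simp [build2]
  | append_singleton p' x ih =>
    intro out rem g hg
    rw [List.foldr_append]
    show (List.foldr _
      (x.toList ++ PySem.List.pyRepeat [' '] (1 + PySem.Int.floordiv rem g) ++ out,
        rem - PySem.Int.floordiv rem g, g - 1) p').1 = _
    have hg' : g - 1 = (p'.length : Int) := by rw [hg]; simp
    rw [ih _ _ _ hg']
    have hgv : (p'.length : Int) + 1 = g := by rw [hg]; simp
    rw [pv_build2_snoc p' x rem, hgv, PySem.List.pyRepeat_singleton]
    simp [List.append_assoc]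

theorem pv_join_empty (L : List (List Char)) : PySem.Chars.join [] L = L.flatten := by
  induction L with
  | nil => simp [PySem.Chars.join_nil]
  | cons p rest ih =>
    cases rest with
    | nil => simp [PySem.Chars.join_singleton]
    | cons q r => rw [PySem.Chars.join_cons_cons]; simp at ih ⊢; simp [ih]

theorem pv_pyGet_neg_one (w : String) (t : List String) :
    PySem.List.pyGet? (w :: t) (-1) = some (t.getLastD w) := by
  simp [PySem.List.pyGet?, PySem.List.pyIdx?]
  have h : (w :: t)[t.length]'(by simp) = (w :: t).getLast (by simp) := by
    rw [List.getLast_eq_getElem]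
    congr 1
  rw [h]
  cases t with
  | nil => simp
  | cons a t' =>
    rw [List.getLast_cons (by simp)]
    simp [List.getLast?_eq_some_getLast (l := a :: t') (by simp)]

theorem pv_A_shuffle (n : Int) (spc : Int → List Char) :
    ∀ (ws : List String) (w : String) (s : Int), s + 1 + (ws.length : Int) = n →
    (PySem.List.enumerate (w :: ws) s).flatMap
        (fun iw => iw.2.toList ++ (if iw.1 < n - 1 then spc iw.1 else [])) =
      (PySem.List.enumerate ((w :: ws).dropLast) s).flatMap (fun iw => iw.2.toList ++ spc iw.1) ++
        (ws.getLastD w).toList := by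
  intro ws
  induction ws with
  | nil =>
    intro w s hs
    simp at hs
    simp [PySem.List.enumerate_cons, PySem.List.enumerate_nil]
    omega
  | cons w' ws' ih =>
    intro w s hs
    have hlt : s < n - 1 := by simp at hs; omega
    have hs' : s + 1 + 1 + (ws'.length : Int) = n := by simp at hs; omega
    rw [PySem.List.enumerate_cons, List.flatMap_cons, ih w' (s + 1) hs']
    rw [show (w :: w' :: ws').dropLast = w :: (w' :: ws').dropLast from rfl]
    rw [PySem.List.enumerate_cons, List.flatMap_cons, List.getLastD_cons]
    simp [if_pos hlt]

theorem pv_flatten_flatMap {α β : Type} (g : α → List (List β)) (l : List α) :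
    (l.flatMap g).flatten = l.flatMap (fun a => (g a).flatten) := by
  induction l with
  | nil => simp
  | cons a l ih => simp [ih]

theorem pv_main (w0 : String) (t : List String) (rem : Int) :
    PySem.Chars.join [] ((PySem.List.enumerate (w0 :: t)).foldl (fun acc iw =>
      let acc' := acc ++ [iw.2.toList]
      if iw.1 < (((w0 :: t).length : Nat) : Int) - 1 then
        acc' ++ [PySem.List.pyRepeat [' ']
          (1 + PySem.Int.floordiv rem ((((w0 :: t).length : Nat) : Int) - 1) +
            (if iw.1 < PySem.Int.mod rem ((((w0 :: t).length : Nat) : Int) - 1) then 1 else 0))]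
      else acc') []) =
    (((PySem.List.slice (w0 :: t) none (some (-1))).reverse).foldl
      (fun (st : List Char × Int × Int) word =>
        let gap := PySem.Int.floordiv st.2.1 st.2.2
        (word.toList ++ PySem.List.pyRepeat [' '] (1 + gap) ++ st.1, st.2.1 - gap, st.2.2 - 1))
      (((PySem.List.pyGet? (w0 :: t) (-1)).getD "").toList, rem, (((w0 :: t).length : Nat) : Int) - 1)).1 := by
  have hlend : (((w0 :: t).dropLast).length : Int) = (((w0 :: t).length : Nat) : Int) - 1 := by
    simp
  rw [PySem.List.slice_to_neg_one, List.foldl_reverse, pv_pyGet_neg_one,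
    pv_foldr_char ((w0 :: t).dropLast) _ rem _ hlend.symm]
  set n : Int := (((w0 :: t).length : Nat) : Int) with hn
  have hbody : (fun (acc : List (List Char)) (iw : Int × String) =>
      let acc' := acc ++ [iw.2.toList]
      if iw.1 < n - 1 then
        acc' ++ [PySem.List.pyRepeat [' ']
          (1 + PySem.Int.floordiv rem (n - 1) +
            (if iw.1 < PySem.Int.mod rem (n - 1) then 1 else 0))]
      else acc')
    = fun acc iw => acc ++ (if iw.1 < n - 1 then
        [iw.2.toList, PySem.List.pyRepeat [' ']
          (1 + PySem.Int.floordiv rem (n - 1) +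
            (if iw.1 < PySem.Int.mod rem (n - 1) then 1 else 0))]
      else [iw.2.toList]) := by
    funext acc iw
    by_cases h : iw.1 < n - 1 <;> simp [h]
  rw [hbody, PySem.List.foldl_append_eq_flatMap, List.nil_append, pv_join_empty,
    pv_flatten_flatMap]
  have hshape : (fun (iw : Int × String) => (if iw.1 < n - 1 then
        [iw.2.toList, PySem.List.pyRepeat [' ']
          (1 + PySem.Int.floordiv rem (n - 1) +
            (if iw.1 < PySem.Int.mod rem (n - 1) then 1 else 0))]
      else [iw.2.toList]).flatten)
      = fun iw => iw.2.toList ++ (if iw.1 < n - 1 then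
          PySem.List.pyRepeat [' ']
            (1 + PySem.Int.floordiv rem (n - 1) +
              (if iw.1 < PySem.Int.mod rem (n - 1) then 1 else 0)) else []) := by
    funext iw
    by_cases h : iw.1 < n - 1 <;> simp [h]
  rw [hshape]
  rw [pv_A_shuffle n (fun i => PySem.List.pyRepeat [' ']
      (1 + PySem.Int.floordiv rem (n - 1) + (if i < PySem.Int.mod rem (n - 1) then 1 else 0)))
    t w0 0 (by rw [hn, List.length_cons]; push_cast; omega)]
  congr 1
  · simp only [PySem.List.pyRepeat_singleton]
    rw [← hlend, ← pv_build2_widths ((w0 :: t).dropLast) rem]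

-- ===== VERDICT (by name: the statement is the Claim_ definition above) =====
theorem add_justified_spacing_spec : Claim_equal_add_justified_spacing := by
  intro text target _
  show add_justified_spacing text target = add_justified_spacing_alt text target
  simp only [add_justified_spacing, add_justified_spacing_alt]
  by_cases h1 : (PySem.Str.split₀ text).length ≤ 1
  · simp only [if_pos h1]
  · simp only [if_neg h1]
    by_cases h2 : target - PySem.Str.len text ≤ 0
    · rw [if_pos (Or.inr h2 : ((PySem.Str.split₀ text).length : Int) - 1 ≤ 0 ∨ target - PySem.Str.len text ≤ 0), if_pos h2]
    · have hg : ¬ (((PySem.Str.split₀ text).length : Int) - 1 ≤ 0 ∨ target - PySem.Str.len text ≤ 0) := by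
        push Not
        refine ⟨?_, by omega⟩
        have h2' : 2 ≤ (PySem.Str.split₀ text).length := by omega
        omega
      rw [if_neg hg, if_neg h2]
      obtain ⟨w0, t, hwt⟩ : ∃ w0 t, PySem.Str.split₀ text = w0 :: t := by
        cases hsp : PySem.Str.split₀ text with
        | nil => rw [hsp] at h1; simp at h1
        | cons a b => exact ⟨a, b, rfl⟩
      rw [hwt]
      exact congrArg String.ofList (pv_main w0 t (target - PySem.Str.len text))
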